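-- pv_equiv track=rewrite | github.com/davemendoza/Research_First_Sourcer_Automation | EXECUTION_CORE/personal_artifact_execution_guard.py | validate_scrape
-- ===== SOURCE A (Python) =====
-- MAX_TOTAL_PAGES = 20
--
-- MAX_DOMAINS = 1
--
-- def validate_scrape(scraper_output):
--     crawl_log = scraper_output.get("crawl_log", {}) or {}
--     pages = crawl_log.get("pages_visited", []) or []
--
--     if len(pages) > MAX_TOTAL_PAGES:
--         return False, "Exceeded maximum crawl page budget."
--
--     domains = set()
--     for url in pages:
--         try:
--             domains.add(url.split("/")[2])
--         except Exception:
--             continue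
--
--     if len(domains) > MAX_DOMAINS:
--         return False, "Exceeded maximum domain crawl limit."
--
--     return True, None
-- ===== SOURCE B (Python) =====
-- MAX_TOTAL_PAGES = 20
--
-- def validate_scrape(scraper_output):
--     crawl_log = scraper_output.get("crawl_log", {}) or {}
--     pages = crawl_log.get("pages_visited", []) or []
--
--     if len(pages) > MAX_TOTAL_PAGES:
--         return False, "Exceeded maximum crawl page budget."
--
--     first_domain = None
--     for url in pages:
--         try:
--             domain = url.split("/")[2]
--         except Exception:
--             continue
--         if first_domain is None:
--             first_domain = domain
--         elif domain != first_domain: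
--             return False, "Exceeded maximum domain crawl limit."
--
--     return True, None
-- ===== Notes on version B (the rewrite author's own statement) =====
-- stated objective: simpler
-- what changed: Replaces the domain set and the post-loop cardinality check with a single first_domain scalar and an early return as soon as a second distinct domain is parsed.
import Mathlib
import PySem

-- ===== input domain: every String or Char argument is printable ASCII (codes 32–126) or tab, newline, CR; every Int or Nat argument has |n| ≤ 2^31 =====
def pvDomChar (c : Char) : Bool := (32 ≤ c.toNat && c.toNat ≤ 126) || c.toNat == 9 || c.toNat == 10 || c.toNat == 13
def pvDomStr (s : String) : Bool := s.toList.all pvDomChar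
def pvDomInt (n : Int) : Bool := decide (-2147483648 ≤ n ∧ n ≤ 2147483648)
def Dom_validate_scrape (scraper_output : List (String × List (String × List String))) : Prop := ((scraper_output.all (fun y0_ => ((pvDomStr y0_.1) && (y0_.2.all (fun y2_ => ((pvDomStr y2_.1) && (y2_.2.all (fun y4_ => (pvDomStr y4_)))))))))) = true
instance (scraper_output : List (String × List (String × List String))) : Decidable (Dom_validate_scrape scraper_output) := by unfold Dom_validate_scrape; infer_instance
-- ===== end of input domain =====

-- B replaces A's domain set + post-loop cardinality check with a single first_domain
-- scalar and an early return on the first second distinct domain (objective: simpler).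

-- ===== PORT A =====
-- loop body of A's for-loop: try domains.add(url.split("/")[2]) except: continue
def pvStep (s : PySem.Set String) (url : String) : PySem.Set String :=
  match PySem.List.pyGet? ((PySem.Str.split? url "/").getD []) 2 with
  | some d => PySem.Set.add s d
  | none => s

def validate_scrape (scraper_output : List (String × List (String × List String))) : Bool × Option String :=
  let crawl_log0 := (PySem.Dict.mk scraper_output).getD "crawl_log" []
  let crawl_log := if crawl_log0 = [] then [] else crawl_log0   -- `or {}`
  let pages0 := (PySem.Dict.mk crawl_log).getD "pages_visited" []
  let pages := if pages0 = [] then [] else pages0               -- `or []`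
  if pages.length > 20 then (false, some "Exceeded maximum crawl page budget.")
  else
    let domains : PySem.Set String := pages.foldl pvStep PySem.Set.empty
    if PySem.Set.len domains > 1 then (false, some "Exceeded maximum domain crawl limit.")
    else (true, none)

-- ===== PORT B =====
-- the for-loop of B: first_domain accumulator, early return at a second distinct domain
def pvGoAlt : List String → Option String → Bool × Option String
  | [], _ => (true, none)
  | url :: rest, fd =>
    match PySem.List.pyGet? ((PySem.Str.split? url "/").getD []) 2, fd with
    | none, _ => pvGoAlt rest fd              -- except: continue
    | some d, none => pvGoAlt rest (some d)   -- first_domain = domain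
    | some d, some d0 =>
      if d ≠ d0 then (false, some "Exceeded maximum domain crawl limit.")
      else pvGoAlt rest (some d0)

def validate_scrape_alt (scraper_output : List (String × List (String × List String))) : Bool × Option String :=
  let crawl_log0 := (PySem.Dict.mk scraper_output).getD "crawl_log" []
  let crawl_log := if crawl_log0 = [] then [] else crawl_log0
  let pages0 := (PySem.Dict.mk crawl_log).getD "pages_visited" []
  let pages := if pages0 = [] then [] else pages0
  if pages.length > 20 then (false, some "Exceeded maximum crawl page budget.")
  else pvGoAlt pages none

-- ===== PRECONDITION & SPEC =====
def Spec_validate_scrape (scraper_output : List (String × List (String × List String))) (out : Bool × Option String) : Prop := out = validate_scrape_alt scraper_output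
instance (scraper_output : List (String × List (String × List String))) (out : Bool × Option String) : Decidable (Spec_validate_scrape scraper_output out) := by unfold Spec_validate_scrape; infer_instance

-- ===== CLAIM (what is proved, stated in full; the proofs are below) =====
def Claim_equal_validate_scrape : Prop := ∀ (scraper_output : List (String × List (String × List String))), Dom_validate_scrape scraper_output → Spec_validate_scrape scraper_output (validate_scrape scraper_output)

-- ===== LEMMAS AND PROOFS =====

theorem pvStep_len_le (s : PySem.Set String) (url : String) :
    s.length ≤ (pvStep s url).length := by
  unfold pvStep
  cases PySem.List.pyGet? ((PySem.Str.split? url "/").getD []) 2 with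
  | none => exact le_refl _
  | some d =>
    simp only [PySem.Set.add]
    split
    · exact le_refl _
    · simp

theorem pv_foldl_len_le (ps : List String) (s : PySem.Set String) :
    s.length ≤ (ps.foldl pvStep s).length := by
  induction ps generalizing s with
  | nil => exact le_refl _
  | cons url rest ih => exact le_trans (pvStep_len_le s url) (ih (pvStep s url))

theorem pvGoAlt_eq (ps : List String) (fd : Option String) :
    pvGoAlt ps fd =
      (if (ps.foldl pvStep (fd.elim ([] : PySem.Set String) (fun d => [d]))).length > 1
       then (false, some "Exceeded maximum domain crawl limit.") else (true, none)) := by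
  induction ps generalizing fd with
  | nil =>
    cases fd <;> simp [pvGoAlt, Option.elim]
  | cons url rest ih =>
    rw [List.foldl_cons]
    unfold pvGoAlt
    cases hparse : PySem.List.pyGet? ((PySem.Str.split? url "/").getD []) 2 with
    | none =>
      have hstep : pvStep (fd.elim ([] : PySem.Set String) (fun d => [d])) url
          = fd.elim ([] : PySem.Set String) (fun d => [d]) := by
        unfold pvStep; rw [hparse]
      rw [hstep]
      cases fd with
      | none => exact ih none
      | some d0 => exact ih (some d0)
    | some d =>
      cases fd with
      | none =>
        have hstep : pvStep ((none : Option String).elim ([] : PySem.Set String) (fun x => [x])) url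
            = [d] := by
          unfold pvStep; rw [hparse]
          simp [PySem.Set.add, PySem.Set.contains]
        rw [hstep]
        exact ih (some d)
      | some d0 =>
        show (if d ≠ d0 then (false, some "Exceeded maximum domain crawl limit.")
              else pvGoAlt rest (some d0)) = _
        by_cases hne : d = d0
        · subst hne
          rw [if_neg (by simp)]
          have hstep : pvStep ((some d).elim ([] : PySem.Set String) (fun x => [x])) url
              = [d] := by
            unfold pvStep; rw [hparse]
            simp [PySem.Set.add, PySem.Set.contains]
          rw [hstep]
          exact ih (some d)
        · rw [if_pos hne]
          have hstep : pvStep ((some d0).elim ([] : PySem.Set String) (fun x => [x])) url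
              = [d0, d] := by
            unfold pvStep; rw [hparse]
            simp [PySem.Set.add, PySem.Set.contains]
            exact fun h => hne h
          rw [hstep]
          have h2 : (2 : Nat) ≤ (rest.foldl pvStep [d0, d]).length := by
            simpa using pv_foldl_len_le rest [d0, d]
          have hgt : (rest.foldl pvStep [d0, d]).length > 1 := by omega
          simp [hgt]

theorem pv_main (pages : List String) :
    (if pages.length > 20 then ((false : Bool), some "Exceeded maximum crawl page budget.")
     else if (pages.foldl pvStep PySem.Set.empty).len > 1
          then (false, some "Exceeded maximum domain crawl limit.") else (true, none))
    = (if pages.length > 20 then ((false : Bool), some "Exceeded maximum crawl page budget.")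
       else pvGoAlt pages none) := by
  split
  · rfl
  · rw [pvGoAlt_eq _ none]
    have hl : PySem.Set.len (List.foldl pvStep PySem.Set.empty pages)
        = (List.foldl pvStep ((none : Option String).elim ([] : PySem.Set String) (fun d => [d])) pages).length := rfl
    rw [hl]
    norm_cast

-- ===== VERDICT (by name: the statement is the Claim_ definition above) =====
theorem validate_scrape_spec : Claim_equal_validate_scrape := by
  intro so _
  unfold Spec_validate_scrape
  exact pv_main _
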